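-- pv_equiv track=rewrite | github.com/zgjsxx/OpenEMS | src/web/admin_server.py | _alarm_lookup
-- ===== SOURCE A (Python) =====
-- from typing import Any, Dict, List, Optional
--
-- def _alarm_lookup(alarms: List[Dict[str, Any]]) -> Dict[str, List[Dict[str, Any]]]:
--     by_point: Dict[str, List[Dict[str, Any]]] = {}
--     for alarm in alarms:
--         point_id = str(alarm.get("point_id") or "")
--         if not point_id:
--             continue
--         by_point.setdefault(point_id, []).append(alarm)
--     return by_point
-- ===== SOURCE B (Python) =====
-- def _alarm_lookup(alarms):
--     keys = [k for k in (str(a.get("point_id") or "") for a in alarms) if k]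
--     return {k: [a for a in alarms if str(a.get("point_id") or "") == k]
--             for k in dict.fromkeys(keys)}
-- ===== Notes on version B (the rewrite author's own statement) =====
-- stated objective: alternative
-- what changed: Replaces the single-pass setdefault/append bucket accumulation with a two-phase comprehension: first compute the order-deduplicated list of non-empty keys (dict.fromkeys), then build each group by filtering the whole input per key.
import Mathlib
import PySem

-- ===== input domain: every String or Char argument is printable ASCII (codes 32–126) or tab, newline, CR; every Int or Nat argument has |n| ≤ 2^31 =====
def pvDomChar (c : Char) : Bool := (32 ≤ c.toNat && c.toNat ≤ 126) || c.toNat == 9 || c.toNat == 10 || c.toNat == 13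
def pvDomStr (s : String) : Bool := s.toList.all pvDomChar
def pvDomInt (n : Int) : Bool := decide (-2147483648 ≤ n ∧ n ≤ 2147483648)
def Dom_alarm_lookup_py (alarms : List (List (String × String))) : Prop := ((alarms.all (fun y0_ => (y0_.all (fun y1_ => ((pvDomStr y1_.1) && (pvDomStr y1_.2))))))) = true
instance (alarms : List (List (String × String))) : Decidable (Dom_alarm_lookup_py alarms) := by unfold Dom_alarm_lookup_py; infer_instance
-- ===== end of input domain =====

-- B builds the dict by a key-dedup pass plus a per-key filter comprehension instead of A's
-- single-pass setdefault/append buckets; same output, different decomposition (not faster).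

-- shared key computation: str(alarm.get("point_id") or "")
def pvKey (alarm : List (String × String)) : String :=
  (PySem.Dict.mk alarm).getD "point_id" ""

-- ===== PORT A =====
def alarm_lookup_py (alarms : List (List (String × String))) : List (String × List (List (String × String))) :=
  (alarms.foldl (fun by_point alarm =>
    let point_id := pvKey alarm
    if point_id = "" then by_point
    else by_point.modify point_id [] (fun v => v ++ [alarm])) PySem.Dict.empty).items

-- ===== PORT B =====
def alarm_lookup_py_alt (alarms : List (List (String × String))) : List (String × List (List (String × String))) :=
  let keys := (alarms.map pvKey).filter (fun k => k ≠ "")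
  (PySem.Set.ofList keys).map (fun k => (k, alarms.filter (fun a => pvKey a = k)))

-- ===== PRECONDITION & SPEC =====
def Spec_alarm_lookup_py (alarms : List (List (String × String))) (out : List (String × List (List (String × String)))) : Prop := out = alarm_lookup_py_alt alarms
instance (alarms : List (List (String × String))) (out : List (String × List (List (String × String)))) : Decidable (Spec_alarm_lookup_py alarms out) := by unfold Spec_alarm_lookup_py; infer_instance

-- ===== CLAIM (what is proved, stated in full; the proofs are below) =====
def Claim_equal_alarm_lookup_py : Prop := ∀ (alarms : List (List (String × String))), Dom_alarm_lookup_py alarms → Spec_alarm_lookup_py alarms (alarm_lookup_py alarms)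

-- ===== LEMMAS AND PROOFS =====

-- the (key, alarm) pairs A actually inserts
def pvPairs (alarms : List (List (String × String))) : List (String × List (String × String)) :=
  alarms.filterMap (fun a => if pvKey a = "" then none else some (pvKey a, a))

theorem pvFoldl_eq_pairs (alarms : List (List (String × String)))
    (d : PySem.Dict String (List (List (String × String)))) :
    alarms.foldl (fun by_point alarm =>
      let point_id := pvKey alarm
      if point_id = "" then by_point
      else by_point.modify point_id [] (fun v => v ++ [alarm])) d
    = (pvPairs alarms).foldl (fun d p => d.modify p.1 [] (fun v => v ++ [p.2])) d := by
  induction alarms generalizing d with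
  | nil => rfl
  | cons a t ih =>
      simp only [pvPairs, List.filterMap_cons, List.foldl_cons] at ih ⊢
      by_cases h : pvKey a = "" <;> simp [h, ih]

theorem pvPairs_map_fst (alarms : List (List (String × String))) :
    (pvPairs alarms).map Prod.fst = (alarms.map pvKey).filter (fun k => k ≠ "") := by
  induction alarms with
  | nil => rfl
  | cons a t ih =>
      simp only [pvPairs, List.filterMap_cons, List.map_cons, List.filter_cons] at ih ⊢
      by_cases h : pvKey a = "" <;> simp [h, ih]

theorem pvPairs_filter (alarms : List (List (String × String))) (k : String) (hk : k ≠ "") :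
    ((pvPairs alarms).filter (fun p => p.1 == k)).map Prod.snd
      = alarms.filter (fun a => pvKey a = k) := by
  induction alarms with
  | nil => rfl
  | cons a t ih =>
      simp only [pvPairs, List.filterMap_cons] at ih ⊢
      by_cases h : pvKey a = ""
      · have hak : ¬ (pvKey a = k) := by rw [h]; exact fun e => hk e.symm
        rw [List.filter_cons_of_neg (by simpa using hak)]
        simpa [h] using ih
      · by_cases h2 : pvKey a = k
        · subst h2
          rw [if_neg h, List.filter_cons_of_pos (by simp),
              List.filter_cons_of_pos (by simp)]
          simpa using ih
        · rw [if_neg h, List.filter_cons_of_neg (by simpa using h2),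
              List.filter_cons_of_neg (by simpa using h2)]
          exact ih

-- ===== VERDICT (by name: the statement is the Claim_ definition above) =====
theorem alarm_lookup_py_spec : Claim_equal_alarm_lookup_py := by
  intro alarms _
  unfold Spec_alarm_lookup_py alarm_lookup_py alarm_lookup_py_alt
  rw [pvFoldl_eq_pairs]
  have hnd : ((pvPairs alarms).foldl (fun d p => d.modify p.1 [] (fun v => v ++ [p.2]))
      PySem.Dict.empty).keys.Nodup := by
    apply PySem.Dict.nodup_keys_foldl_modify_key (key := Prod.fst)
      (f := fun d p v => v ++ [p.2])
    simp [PySem.Dict.keys_empty]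
  rw [PySem.Dict.items_eq_map_keys _ hnd []]
  rw [PySem.Dict.keys_foldl_modify_key (key := Prod.fst) (f := fun d p v => v ++ [p.2])]
  rw [PySem.Dict.keys_empty, PySem.Set.update_nil_left, pvPairs_map_fst]
  apply List.map_congr_left
  intro k hkmem
  have hk : k ≠ "" := by
    have h1 : k ∈ (alarms.map pvKey).filter (fun k => k ≠ "") := by
      simpa [PySem.Set.mem_ofList] using hkmem
    simpa using (List.mem_filter.mp h1).2
  have hg := PySem.Dict.getD_foldl_modify_append (l := pvPairs alarms)
      (d := PySem.Dict.empty) (c := k)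
  rw [hg, PySem.Dict.getD_empty, List.nil_append, pvPairs_filter alarms k hk]
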